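-- pv_equiv track=rewrite | github.com/hectorhernandezalfonso/autotetris | tetris.py | GetWellSums
-- ===== SOURCE A (Python) =====
-- def GetWellSums(board, num_columns):
--     well_sums = 0
--
--     # Check for well cells in inner columns
--     for i in range(1, num_columns - 1):
--         for j in range(len(board) - 1, -1, -1):
--             if (board[j] >> i) & 1 == 0 and (board[j] >> (i - 1)) & 1 == 1 and (board[j] >> (i + 1)) & 1 == 1:
--                 well_sums += 1
--                 for k in range(j - 1, -1, -1):
--                     if (board[k] >> i) & 1 == 0:
--                         well_sums += 1
--                     else:
--                         break
--
--     # Check for wells in the leftmost column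
--     for j in range(len(board) - 1, -1, -1):
--         if (board[j] >> 0) & 1 == 0 and (board[j] >> 1) & 1 == 1:
--             well_sums += 1
--             for k in range(j - 1, -1, -1):
--                 if (board[k] >> 0) & 1 == 0:
--                     well_sums += 1
--                 else:
--                     break
--
--     # Check for wells in the rightmost column
--     for j in range(len(board) - 1, -1, -1):
--         if (board[j] >> (num_columns - 1)) & 1 == 0 and (board[j] >> (num_columns - 2)) & 1 == 1:
--             well_sums += 1
--             for k in range(j - 1, -1, -1):
--                 if (board[k] & 1 << (num_columns - 1)) == 0:  # Equivalent to (board[k] >> (num_columns - 1)) & 1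
--                     well_sums += 1
--                 else:
--                     break
--
--     return well_sums
-- ===== SOURCE B (Python) =====
-- def GetWellSums(board, num_columns):
--     # One pass per column: scan rows top-to-bottom keeping a running count of
--     # consecutive empty cells just above; each well cell adds run + 1.
--     total = 0
--     last = num_columns - 1
--     for c in range(num_columns):
--         run = 0
--         for v in board:
--             if (v >> c) & 1 == 0:
--                 if (c == 0 or (v >> (c - 1)) & 1) and (c == last or (v >> (c + 1)) & 1):
--                     total += run + 1
--                 run += 1
--             else:
--                 run = 0
--     return total
-- ===== Notes on version B (the rewrite author's own statement) =====
-- stated objective: alternative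
-- what changed: A rescans upward from every well cell to count the empty cells above it (a nested rescan per well cell per column); B makes one top-to-bottom pass per column maintaining a running count of consecutive empty cells, charging each well cell run+1 in O(1).
import Mathlib
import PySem

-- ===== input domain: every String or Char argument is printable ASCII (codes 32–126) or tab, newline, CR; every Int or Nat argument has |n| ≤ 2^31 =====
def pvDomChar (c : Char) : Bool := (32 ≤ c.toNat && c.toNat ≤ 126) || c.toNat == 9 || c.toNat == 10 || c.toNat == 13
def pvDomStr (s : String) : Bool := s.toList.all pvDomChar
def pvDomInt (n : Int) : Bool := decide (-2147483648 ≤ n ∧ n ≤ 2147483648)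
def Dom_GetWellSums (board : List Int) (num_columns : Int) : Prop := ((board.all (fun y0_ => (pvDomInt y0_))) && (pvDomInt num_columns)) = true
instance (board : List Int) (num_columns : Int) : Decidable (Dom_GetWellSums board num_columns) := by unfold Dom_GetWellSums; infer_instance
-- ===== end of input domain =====

-- B replaces A's per-well upward rescans by one top-to-bottom pass per column that
-- maintains a running count of consecutive empty cells (objective: alternative).

-- ===== PORT A =====
-- Python's '>>' / '<<' with a Nat shift amount (forces the Int-by-Nat instance)
def pvShr (v : Int) (k : Nat) : Int := v >>> k
def pvShl (v : Int) (k : Nat) : Int := v <<< k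

-- the break-style inner scan 'for k in range(j-1,-1,-1): if <empty>: ws += 1 else: break'
def pvBreak (board : List Int) (p : Int → Prop) [DecidablePred p] : List Int → Int → Int
  | [], ws => ws
  | k :: rest, ws =>
    if p (PySem.List.pyGetD board k 0) then pvBreak board p rest (ws + 1) else ws

def GetWellSums (board : List Int) (num_columns : Int) : Int :=
  -- rightmost-column scan applied to the leftmost-column scan applied to the
  -- inner-columns scan of the initial 0 (the three loop blocks of A, in order)
  (PySem.List.pyRange ((board.length : Int) - 1) (-1) (-1)).foldl (fun ws j =>
      if PySem.Int.band (pvShr (PySem.List.pyGetD board j 0) (num_columns - 1).toNat) 1 = 0 ∧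
         PySem.Int.band (pvShr (PySem.List.pyGetD board j 0) (num_columns - 2).toNat) 1 = 1 then
        pvBreak board (fun v => PySem.Int.band v (pvShl 1 (num_columns - 1).toNat) = 0)
          (PySem.List.pyRange (j - 1) (-1) (-1)) (ws + 1)
      else ws)
    ((PySem.List.pyRange ((board.length : Int) - 1) (-1) (-1)).foldl (fun ws j =>
      if PySem.Int.band (pvShr (PySem.List.pyGetD board j 0) 0) 1 = 0 ∧
         PySem.Int.band (pvShr (PySem.List.pyGetD board j 0) 1) 1 = 1 then
        pvBreak board (fun v => PySem.Int.band (pvShr v 0) 1 = 0)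
          (PySem.List.pyRange (j - 1) (-1) (-1)) (ws + 1)
      else ws)
    ((PySem.List.pyRange 1 (num_columns - 1)).foldl (fun ws i =>
      (PySem.List.pyRange ((board.length : Int) - 1) (-1) (-1)).foldl (fun ws j =>
        if PySem.Int.band (pvShr (PySem.List.pyGetD board j 0) i.toNat) 1 = 0 ∧
           PySem.Int.band (pvShr (PySem.List.pyGetD board j 0) (i - 1).toNat) 1 = 1 ∧
           PySem.Int.band (pvShr (PySem.List.pyGetD board j 0) (i + 1).toNat) 1 = 1 then
          pvBreak board (fun v => PySem.Int.band (pvShr v i.toNat) 1 = 0)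
            (PySem.List.pyRange (j - 1) (-1) (-1)) (ws + 1)
        else ws) ws) 0))

-- ===== PORT B =====
def GetWellSums_alt (board : List Int) (num_columns : Int) : Int :=
  (PySem.List.pyRange 0 num_columns).foldl (fun total c =>
    (board.foldl (fun (st : Int × Int) (v : Int) =>
      if PySem.Int.band (pvShr v c.toNat) 1 = 0 then
        (st.1 + 1,
         if (c = 0 ∨ PySem.Int.band (pvShr v (c - 1).toNat) 1 ≠ 0) ∧
            (c = num_columns - 1 ∨ PySem.Int.band (pvShr v (c + 1).toNat) 1 ≠ 0) then
           st.2 + st.1 + 1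
         else st.2)
      else (0, st.2)) (0, total)).2) 0

-- ===== PRECONDITION & SPEC =====
-- Pre_ excludes only the inputs where A raises ValueError: a negative shift amount
-- 'num_columns - 1' or 'num_columns - 2' is evaluated whenever the board is nonempty and
-- num_columns ≤ 0, or num_columns = 1 and some row is even (bit 0 clear, so the rightmost
-- check's second conjunct is reached); A returns on every input Pre_ admits.
def Pre_GetWellSums (board : List Int) (num_columns : Int) : Prop :=
  board = [] ∨ 2 ≤ num_columns ∨ (num_columns = 1 ∧ ∀ v ∈ board, PySem.Int.mod v 2 = 1)
instance (board : List Int) (num_columns : Int) : Decidable (Pre_GetWellSums board num_columns) := by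
  unfold Pre_GetWellSums; infer_instance
def pvWitness_GetWellSums : List Int × Int := ([5, 2, 5, 7], 3)

def Spec_GetWellSums (board : List Int) (num_columns : Int) (out : Int) : Prop := out = GetWellSums_alt board num_columns
instance (board : List Int) (num_columns : Int) (out : Int) : Decidable (Spec_GetWellSums board num_columns out) := by unfold Spec_GetWellSums; infer_instance

-- ===== CLAIM (what is proved, stated in full; the proofs are below) =====
def Claim_equal_GetWellSums : Prop := ∀ (board : List Int) (num_columns : Int), Dom_GetWellSums board num_columns → Pre_GetWellSums board num_columns → Spec_GetWellSums board num_columns (GetWellSums board num_columns)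

-- ===== LEMMAS AND PROOFS =====

-- length of the maximal empty prefix (the quantity A's break-loop counts)
def cwAux (e : Int → Prop) [DecidablePred e] : List Int → Int
  | [] => 0
  | v :: vs => if e v then 1 + cwAux e vs else 0

-- total well contribution of a column, scanning top-to-bottom with run count r
def contribSum (e w : Int → Prop) [DecidablePred e] [DecidablePred w] : List Int → Int → Int
  | [], _ => 0
  | v :: vs, r => (if w v then r + 1 else 0) + contribSum e w vs (if e v then r + 1 else 0)

theorem contribSum_congr (e e' w w' : Int → Prop) [DecidablePred e] [DecidablePred e']
    [DecidablePred w] [DecidablePred w'] (he : ∀ v, e v ↔ e' v) (hw : ∀ v, w v ↔ w' v) :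
    ∀ (l : List Int) (r : Int), contribSum e w l r = contribSum e' w' l r := by
  intro l
  induction l with
  | nil => intro r; rfl
  | cons v vs ih =>
      intro r
      rw [contribSum, contribSum, if_congr (hw v) rfl rfl, if_congr (he v) rfl rfl, ih]

theorem pvBreak_eq (board : List Int) (p : Int → Prop) [DecidablePred p] :
    ∀ (ks : List Int) (ws : Int),
      pvBreak board p ks ws = ws + cwAux p (ks.map (fun k => PySem.List.pyGetD board k 0)) := by
  intro ks
  induction ks with
  | nil => intro ws; simp [pvBreak, cwAux]
  | cons k rest ih =>
      intro ws
      by_cases h : p (PySem.List.pyGetD board k 0)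
      · simp only [pvBreak, List.map_cons, cwAux, if_pos h, ih]; ring
      · simp only [pvBreak, List.map_cons, cwAux, if_neg h, add_zero]

theorem band1_ne_zero (a : Int) : PySem.Int.band a 1 ≠ 0 ↔ PySem.Int.band a 1 = 1 := by
  rw [PySem.Int.band_one]
  have h1 : 0 ≤ PySem.Int.mod a 2 := PySem.Int.mod_nonneg a (by norm_num)
  have h2 : PySem.Int.mod a 2 < 2 := PySem.Int.mod_lt a (by norm_num)
  omega

theorem band_two_pow_eq_zero_iff (v : Int) (k : Nat) :
    PySem.Int.band v (pvShl 1 k) = 0 ↔ PySem.Int.band (pvShr v k) 1 = 0 := by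
  unfold pvShl pvShr
  have hpn : 0 < 2 ^ k := Nat.two_pow_pos k
  have h2k : ((2 : Int) ^ k) = ((2 ^ k : Nat) : Int) := by push_cast; ring
  rw [Int.shiftLeft_eq, one_mul, PySem.Int.band_one,
      PySem.Int.mod_eq_emod_of_pos (by norm_num), Int.shiftRight_eq_div_pow, h2k]
  rcases (by omega : 0 ≤ v ∨ v < 0) with hv | hv
  · obtain ⟨x, rfl⟩ := Int.eq_ofNat_of_zero_le hv
    have hL : PySem.Int.band (x : Int) ((2 ^ k : Nat) : Int) = ((x &&& 2 ^ k : Nat) : Int) := by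
      rw [PySem.Int.band, if_pos (by positivity : (0:Int) ≤ (x:Int)),
          if_pos (by positivity : (0:Int) ≤ ((2 ^ k : Nat) : Int))]
      rw [show ((x : Int)).toNat = x from by omega,
          show (((2 ^ k : Nat) : Int)).toNat = 2 ^ k from by omega]
    rw [hL, Nat.and_two_pow]
    have hdiv : ((x : Nat) : Int) / ((2 ^ k : Nat) : Int) = ((x / 2 ^ k : Nat) : Int) := by
      obtain ⟨q, r, hx, hr⟩ : ∃ q r, x = 2 ^ k * q + r ∧ r < 2 ^ k :=
        ⟨x / 2 ^ k, x % 2 ^ k, (Nat.div_add_mod x (2 ^ k)).symm, Nat.mod_lt _ hpn⟩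
      have hq : x / 2 ^ k = q := by
        subst hx; rw [Nat.mul_add_div hpn, Nat.div_eq_of_lt hr, Nat.add_zero]
      have hrepr : ((x : Nat) : Int) = ((r : Nat) : Int) + (q : Int) * ((2 ^ k : Nat) : Int) := by
        subst hx; push_cast; ring
      rw [hrepr, Int.add_mul_ediv_right _ _ (by positivity),
          Int.ediv_eq_zero_of_lt (by positivity) (by exact_mod_cast hr), hq]
      omega
    rw [hdiv]
    have := Nat.toNat_testBit x k
    constructor
    · intro h
      have hb : (x.testBit k).toNat = 0 := by
        rcases Nat.mul_eq_zero.mp (by exact_mod_cast h) with h' | h'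
        · exact h'
        · omega
      have : x / 2 ^ k % 2 = 0 := by omega
      omega
    · intro h
      have hx2 : x / 2 ^ k % 2 = 0 := by omega
      have : (x.testBit k).toNat = 0 := by omega
      simp [this]
  · obtain ⟨x, rfl⟩ := Int.eq_negSucc_of_lt_zero hv
    have hneg : ¬ (0 : Int) ≤ Int.negSucc x := by omega
    have hxe : (-(Int.negSucc x) - 1) = ((x : Nat) : Int) := by
      rw [Int.negSucc_eq]; ring
    have hL : PySem.Int.band (Int.negSucc x) ((2 ^ k : Nat) : Int)
        = ((2 ^ k - (2 ^ k &&& x) : Nat) : Int) := by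
      rw [PySem.Int.band, if_neg hneg, if_pos (by positivity), hxe]
      rw [show ((x : Int)).toNat = x from by omega,
          show (((2 ^ k : Nat) : Int)).toNat = 2 ^ k from by omega]
    obtain ⟨q, r, hx, hr⟩ : ∃ q r, x = 2 ^ k * q + r ∧ r < 2 ^ k :=
      ⟨x / 2 ^ k, x % 2 ^ k, (Nat.div_add_mod x (2 ^ k)).symm, Nat.mod_lt _ hpn⟩
    have hq : x / 2 ^ k = q := by
      subst hx; rw [Nat.mul_add_div hpn, Nat.div_eq_of_lt hr, Nat.add_zero]
    have hdiv : (Int.negSucc x) / ((2 ^ k : Nat) : Int) = -(q : Int) - 1 := by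
      have hrepr : (Int.negSucc x) = ((2 ^ k - 1 - r : Nat) : Int)
          + (-(q : Int) - 1) * ((2 ^ k : Nat) : Int) := by
        rw [Int.negSucc_eq]
        have h1 : ((2 ^ k - 1 - r : Nat) : Int) = ((2 ^ k : Nat) : Int) - 1 - (r : Int) := by
          omega
        have h2 : ((x : Nat) : Int) = ((2 ^ k : Nat) : Int) * (q : Int) + (r : Int) := by
          subst hx; push_cast; ring
        rw [h1]; rw [show ((x:Nat):Int) + 1 = ((2 ^ k : Nat) : Int) * (q : Int) + (r : Int) + 1 from by rw [h2]]
        ring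
      rw [hrepr, Int.add_mul_ediv_right _ _ (by positivity),
          Int.ediv_eq_zero_of_lt (by positivity) (by exact_mod_cast (by omega : 2 ^ k - 1 - r < 2 ^ k))]
      ring
    rw [hL, hdiv, Nat.and_comm, Nat.and_two_pow]
    have ht := Nat.toNat_testBit x k
    have hb01 : (x.testBit k).toNat = 0 ∨ (x.testBit k).toNat = 1 := by
      rcases x.testBit k with _ | _ <;> simp
    rw [hq] at ht
    constructor
    · intro h
      have h' : 2 ^ k - (x.testBit k).toNat * 2 ^ k = 0 := by exact_mod_cast h
      have h1' : (x.testBit k).toNat = 1 := by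
        rcases hb01 with h0 | h1
        · rw [h0, Nat.zero_mul, Nat.sub_zero] at h'; omega
        · exact h1
      have hq2 : q % 2 = 1 := by omega
      omega
    · intro h
      have hq2 : q % 2 = 1 := by omega
      have : (x.testBit k).toNat = 1 := by omega
      rw [this, one_mul]
      simp

theorem map_getD_range (l : List Int) :
    ∀ j, j ≤ l.length → (List.range j).map (fun k => l.getD k 0) = l.take j := by
  intro j
  induction j with
  | zero => intro _; simp
  | succ j ih =>
      intro h
      rw [List.range_succ, List.map_append, ih (by omega), List.map_singleton, List.take_succ]
      congr 1
      rw [List.getD_eq_getElem?_getD, List.getElem?_eq_getElem (by omega)]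
      simp

theorem rowIdx (l : List Int) (j : Nat) (h : j ≤ l.length) :
    (PySem.List.pyRange ((j : Int) - 1) (-1) (-1)).map (fun k => PySem.List.pyGetD l k 0)
      = (l.take j).reverse := by
  rw [PySem.List.pyRange_neg_one_eq_reverse,
      show ((-1 : Int) + 1) = 0 from by norm_num,
      show ((j : Int) - 1 + 1) = (j : Int) from by ring,
      PySem.List.pyRange_one, List.map_reverse, List.map_map]
  rw [show ((j : Int) - 0).toNat = j from by omega]
  congr 1
  rw [← map_getD_range l j h]
  apply List.map_congr_left
  intro k _
  simp [PySem.List.pyGetD_natCast]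

theorem sumS (e w : Int → Prop) [DecidablePred e] [DecidablePred w] :
    ∀ (l pre : List Int),
      ((List.range l.length).map (fun j =>
          if w (l.getD j 0) then 1 + cwAux e ((l.take j).reverse ++ pre) else 0)).sum
        = contribSum e w l (cwAux e pre) := by
  intro l
  induction l with
  | nil => intro pre; simp [contribSum]
  | cons v vs ih =>
      intro pre
      rw [List.length_cons, List.range_succ_eq_map, List.map_cons, List.map_map, List.sum_cons]
      have htail : (List.map ((fun j =>
          if w ((v :: vs).getD j 0) then 1 + cwAux e (((v :: vs).take j).reverse ++ pre) else 0)
            ∘ Nat.succ) (List.range vs.length)).sum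
          = contribSum e w vs (cwAux e (v :: pre)) := by
        rw [← ih (v :: pre)]
        congr 1
        apply List.map_congr_left
        intro j _
        simp only [Function.comp, List.getD_cons_succ, List.take_succ_cons, List.reverse_cons,
          List.append_assoc, List.singleton_append]
      rw [htail, contribSum]
      have hrun : cwAux e (v :: pre) = (if e v then cwAux e pre + 1 else 0) := by
        rw [cwAux]; split_ifs <;> ring
      rw [hrun]
      simp only [List.getD_cons_zero, List.take_zero, List.reverse_nil, List.nil_append]
      split_ifs <;> ring

theorem foldA (e w : Int → Prop) [DecidablePred e] [DecidablePred w] (board : List Int)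
    (ws : Int) :
    (PySem.List.pyRange ((board.length : Int) - 1) (-1) (-1)).foldl
      (fun ws j => if w (PySem.List.pyGetD board j 0) then
          pvBreak board e (PySem.List.pyRange (j - 1) (-1) (-1)) (ws + 1) else ws) ws
      = ws + contribSum e w board 0 := by
  have hstep : ∀ (a : Int), ∀ j ∈ PySem.List.pyRange ((board.length : Int) - 1) (-1) (-1),
      (if w (PySem.List.pyGetD board j 0) then
          pvBreak board e (PySem.List.pyRange (j - 1) (-1) (-1)) (a + 1) else a)
      = a + (if w (PySem.List.pyGetD board j 0) then
          1 + cwAux e ((PySem.List.pyRange (j - 1) (-1) (-1)).map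
            (fun k => PySem.List.pyGetD board k 0)) else 0) := by
    intro a j _
    by_cases hw : w (PySem.List.pyGetD board j 0)
    · rw [if_pos hw, if_pos hw, pvBreak_eq]; ring
    · rw [if_neg hw, if_neg hw, add_zero]
  rw [PySem.List.foldl_congr_mem _ _ _ ws hstep, PySem.List.foldl_add]
  congr 1
  rw [PySem.List.pyRange_neg_one_eq_reverse,
      show ((-1 : Int) + 1) = 0 from by norm_num,
      show ((board.length : Int) - 1 + 1) = (board.length : Int) from by ring,
      List.map_reverse, List.sum_reverse, PySem.List.pyRange_one,
      show ((board.length : Int) - 0).toNat = board.length from by omega,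
      List.map_map]
  have hpt : ∀ j ∈ List.range board.length,
      ((fun j => if w (PySem.List.pyGetD board j 0) then
          1 + cwAux e ((PySem.List.pyRange (j - 1) (-1) (-1)).map
            (fun k => PySem.List.pyGetD board k 0)) else 0) ∘ (fun k : Nat => (0 : Int) + (k : Int))) j
      = (fun j => if w (board.getD j 0) then 1 + cwAux e ((board.take j).reverse ++ []) else 0) j := by
    intro j hj
    have hj' : j ≤ board.length := le_of_lt (List.mem_range.mp hj)
    simp only [Function.comp, zero_add]
    rw [rowIdx board j hj', PySem.List.pyGetD_natCast]
    simp
  rw [List.map_congr_left hpt, sumS e w board []]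
  rfl

theorem foldB (e nb : Int → Prop) [DecidablePred e] [DecidablePred nb] :
    ∀ (l : List Int) (r t : Int),
      (l.foldl (fun (st : Int × Int) (v : Int) =>
          if e v then (st.1 + 1, if nb v then st.2 + st.1 + 1 else st.2) else (0, st.2)) (r, t)).2
        = t + contribSum e (fun v => e v ∧ nb v) l r := by
  intro l
  induction l with
  | nil => intro r t; simp [contribSum]
  | cons v vs ih =>
      intro r t
      by_cases he : e v
      · by_cases hn : nb v
        · simp only [List.foldl_cons, if_pos he, if_pos hn, if_pos (And.intro he hn),
            contribSum, ih]
          ring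
        · have hw : ¬ (e v ∧ nb v) := fun h => hn h.2
          simp only [List.foldl_cons, if_pos he, if_neg hn, if_neg hw, contribSum, ih]
          ring
      · have hw : ¬ (e v ∧ nb v) := fun h => he h.1
        simp only [List.foldl_cons, if_neg he, if_neg hw, contribSum, ih]
        ring

theorem pvShr_zero (v : Int) : pvShr v 0 = v := by
  unfold pvShr
  rw [Int.shiftRight_eq_div_pow]
  norm_num

theorem contribSum_zero (e w : Int → Prop) [DecidablePred e] [DecidablePred w]
    (l : List Int) (hw : ∀ v ∈ l, ¬ w v) : ∀ r, contribSum e w l r = 0 := by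
  induction l with
  | nil => intro r; rfl
  | cons v vs ih =>
      intro r
      rw [contribSum, if_neg (hw v (List.mem_cons_self ..)),
          ih (fun u hu => hw u (List.mem_cons_of_mem v hu)), add_zero]

-- per-column totals of each program (proof-only abbreviations)
def colA (board : List Int) (i : Int) : Int :=
  contribSum (fun v => PySem.Int.band (pvShr v i.toNat) 1 = 0)
    (fun v => PySem.Int.band (pvShr v i.toNat) 1 = 0 ∧
       PySem.Int.band (pvShr v (i - 1).toNat) 1 = 1 ∧
       PySem.Int.band (pvShr v (i + 1).toNat) 1 = 1) board 0

def colLft (board : List Int) : Int :=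
  contribSum (fun v => PySem.Int.band (pvShr v 0) 1 = 0)
    (fun v => PySem.Int.band (pvShr v 0) 1 = 0 ∧
       PySem.Int.band (pvShr v 1) 1 = 1) board 0

def colRgt (board : List Int) (nc : Int) : Int :=
  contribSum (fun v => PySem.Int.band v (pvShl 1 (nc - 1).toNat) = 0)
    (fun v => PySem.Int.band (pvShr v (nc - 1).toNat) 1 = 0 ∧
       PySem.Int.band (pvShr v (nc - 2).toNat) 1 = 1) board 0

def colB (board : List Int) (nc c : Int) : Int :=
  contribSum (fun v => PySem.Int.band (pvShr v c.toNat) 1 = 0)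
    (fun v => PySem.Int.band (pvShr v c.toNat) 1 = 0 ∧
       ((c = 0 ∨ PySem.Int.band (pvShr v (c - 1).toNat) 1 ≠ 0) ∧
        (c = nc - 1 ∨ PySem.Int.band (pvShr v (c + 1).toNat) 1 ≠ 0))) board 0

theorem A_eq (board : List Int) (nc : Int) :
    GetWellSums board nc
      = ((PySem.List.pyRange 1 (nc - 1)).map (colA board)).sum + colLft board + colRgt board nc := by
  unfold GetWellSums
  rw [PySem.List.foldl_congr_mem (PySem.List.pyRange 1 (nc - 1)) _
        (fun ws i => ws + colA board i) 0 (fun a i _ => foldA _ _ board a)]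
  rw [PySem.List.foldl_add, zero_add]
  rw [foldA (fun v => PySem.Int.band (pvShr v 0) 1 = 0)
        (fun v => PySem.Int.band (pvShr v 0) 1 = 0 ∧
           PySem.Int.band (pvShr v 1) 1 = 1) board]
  rw [foldA (fun v => PySem.Int.band v (pvShl 1 (nc - 1).toNat) = 0)
        (fun v => PySem.Int.band (pvShr v (nc - 1).toNat) 1 = 0 ∧
           PySem.Int.band (pvShr v (nc - 2).toNat) 1 = 1) board]
  rfl

theorem B_eq (board : List Int) (nc : Int) :
    GetWellSums_alt board nc = ((PySem.List.pyRange 0 nc).map (colB board nc)).sum := by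
  unfold GetWellSums_alt
  rw [PySem.List.foldl_congr_mem _ _ (fun total c => total + colB board nc c) 0
        (fun acc c _ => foldB _ _ board 0 acc)]
  rw [PySem.List.foldl_add, zero_add]

-- ===== VERDICT (by name: the statement is the Claim_ definition above) =====
theorem GetWellSums_spec : Claim_equal_GetWellSums := by
  intro board nc hdom hpre
  unfold Spec_GetWellSums
  rw [A_eq, B_eq]
  rcases hpre with hb | hnc | ⟨hnc1, hodd⟩
  · subst hb
    rw [List.sum_eq_zero (by intro x hx; obtain ⟨i, _, rfl⟩ := List.mem_map.mp hx; rfl),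
        List.sum_eq_zero (by intro x hx; obtain ⟨c, _, rfl⟩ := List.mem_map.mp hx; rfl)]
    rfl
  · rw [PySem.List.pyRange_one_cons (by omega : (0 : Int) < nc),
        show (0 : Int) + 1 = 1 from by norm_num,
        PySem.List.pyRange_one_append 1 (nc - 1) nc (by omega) (by omega),
        show PySem.List.pyRange (nc - 1) nc = [nc - 1] from by
          rw [PySem.List.pyRange_one_cons (by omega : nc - 1 < nc),
              show nc - 1 + 1 = nc from by ring]
          simp [PySem.List.pyRange_one_eq_nil]]
    rw [List.map_cons, List.map_append, List.map_singleton, List.sum_cons, List.sum_append,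
        List.sum_singleton]
    have hL : colB board nc 0 = colLft board := by
      unfold colB colLft
      apply contribSum_congr
      · intro v
        norm_num
      · intro v
        norm_num [band1_ne_zero, show ¬((0 : Int) = nc - 1) from by omega]
    have hR : colB board nc (nc - 1) = colRgt board nc := by
      unfold colB colRgt
      apply contribSum_congr
      · intro v
        rw [band_two_pow_eq_zero_iff]
      · intro v
        norm_num [band1_ne_zero, show ¬(nc - 1 = 0) from by omega,
          show nc - 1 - 1 = nc - 2 from by ring]
    have hI : (PySem.List.pyRange 1 (nc - 1)).map (colB board nc)
        = (PySem.List.pyRange 1 (nc - 1)).map (colA board) := by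
      apply List.map_congr_left
      intro i hi
      have hib := PySem.List.mem_pyRange_one.mp hi
      unfold colB colA
      apply contribSum_congr
      · intro v; exact Iff.rfl
      · intro v
        norm_num [band1_ne_zero, show ¬(i = 0) from by omega,
          show ¬(i = nc - 1) from by omega]
    rw [hL, hR, hI]
    ring
  · -- num_columns = 1 and every row is odd: every column total is 0 on both sides
    subst hnc1
    have hball : ∀ v ∈ board, PySem.Int.band (pvShr v 0) 1 ≠ 0 := by
      intro v hv
      rw [pvShr_zero, PySem.Int.band_one, hodd v hv]
      norm_num
    rw [show PySem.List.pyRange 1 ((1 : Int) - 1) = [] from by decide,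
        show PySem.List.pyRange 0 (1 : Int) = [0] from by decide]
    rw [List.map_nil, List.sum_nil, List.map_singleton, List.sum_singleton]
    rw [show colLft board = 0 from contribSum_zero _ _ board
          (fun v hv h => hball v hv h.1) 0,
        show colRgt board 1 = 0 from contribSum_zero _ _ board
          (fun v hv h => hball v hv (by simpa using h.1)) 0,
        show colB board 1 0 = 0 from contribSum_zero _ _ board
          (fun v hv h => hball v hv (by simpa using h.1)) 0]
    norm_num
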